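-- pv_equiv track=rewrite | github.com/Concinnity-Risks/LogisticalBudget | scoring.py | score_resource_cost
-- ===== SOURCE A (Python) =====
-- def score_resource_cost(event, attributes):
--     """
--     Score based on indicators of resource cost (WIP)
--
--     Key indicators of resource cost will be numbers of targets and analysis effort
--     """
--     score = 0
--
--     for attribute in attributes:
--         if attribute["category"] == "Network activity":
--             ty = attribute["type"]
--             if ty == "domain":
--                 score += 100
--             elif ty == "hostname" or ty == "url" or ty == "ip-src":
--                 score += 50
--         elif attribute["category"] == "Payload delivery" or attribute["category"] == "Payload installation" or \
--              attribute["category"] == "Artifacts dropped":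
--             ty = attribute["type"]
--             if ty == "vulnerability":
--                 score += 100
--             elif ty == "malware-sample":
--                 score += 50
--             elif ty == "filename" or ty == "filename|md5" or ty == "filename|sha1" or ty == "filename|sha256" or ty == "attachment":
--                 score += 1
--             elif ty == "md5" or ty == "sha1" or ty == "sha256":
--                 score += 1
--         elif attribute["category"] == "External analysis":
--             ty = attribute["type"]
--             if ty == "vulnerability":
--                 score += 100
--             elif ty == "filename" or ty == "filename|md5" or ty == "filename|sha1" or ty == "filename|sha256":
--                 score += 1
--             elif ty == "md5" or ty == "sha1" or ty == "sha256":
--                 score += 1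
--
--     return score
-- ===== SOURCE B (Python) =====
-- _HANDLED = frozenset({
--     "Network activity", "Payload delivery", "Payload installation",
--     "Artifacts dropped", "External analysis",
-- })
--
-- _PAYLOAD_CATS = ("Payload delivery", "Payload installation", "Artifacts dropped")
--
-- _TIER100 = frozenset(
--     {("Network activity", "domain")}
--     | {(c, "vulnerability") for c in _PAYLOAD_CATS}
--     | {("External analysis", "vulnerability")}
-- )
--
-- _TIER50 = frozenset(
--     {("Network activity", t) for t in ("hostname", "url", "ip-src")}
--     | {(c, "malware-sample") for c in _PAYLOAD_CATS}
-- )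
--
-- _TIER1 = frozenset(
--     {(c, t) for c in _PAYLOAD_CATS
--      for t in ("filename", "filename|md5", "filename|sha1", "filename|sha256",
--                "attachment", "md5", "sha1", "sha256")}
--     | {("External analysis", t)
--        for t in ("filename", "filename|md5", "filename|sha1", "filename|sha256",
--                  "md5", "sha1", "sha256")}
-- )
--
--
-- def score_resource_cost(event, attributes):
--     # Stage 1: project each attribute of a handled category to its (category, type) key.
--     keys = [(a["category"], a["type"]) for a in attributes
--             if a["category"] in _HANDLED]
--     # Stage 2: the score is the 100/50/1-weighted count of keys in each point tier.
--     return (100 * sum(k in _TIER100 for k in keys)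
--             + 50 * sum(k in _TIER50 for k in keys)
--             + sum(k in _TIER1 for k in keys))
-- ===== Notes on version B (the rewrite author's own statement) =====
-- stated objective: alternative
-- what changed: B first projects attributes of handled categories to (category,type) keys, then computes the score as 100/50/1-weighted counts of those keys over three fixed point-tier sets (staged projection + three counting passes), instead of A's single pass of nested if/elif per-attribute accumulation.
import Mathlib
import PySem

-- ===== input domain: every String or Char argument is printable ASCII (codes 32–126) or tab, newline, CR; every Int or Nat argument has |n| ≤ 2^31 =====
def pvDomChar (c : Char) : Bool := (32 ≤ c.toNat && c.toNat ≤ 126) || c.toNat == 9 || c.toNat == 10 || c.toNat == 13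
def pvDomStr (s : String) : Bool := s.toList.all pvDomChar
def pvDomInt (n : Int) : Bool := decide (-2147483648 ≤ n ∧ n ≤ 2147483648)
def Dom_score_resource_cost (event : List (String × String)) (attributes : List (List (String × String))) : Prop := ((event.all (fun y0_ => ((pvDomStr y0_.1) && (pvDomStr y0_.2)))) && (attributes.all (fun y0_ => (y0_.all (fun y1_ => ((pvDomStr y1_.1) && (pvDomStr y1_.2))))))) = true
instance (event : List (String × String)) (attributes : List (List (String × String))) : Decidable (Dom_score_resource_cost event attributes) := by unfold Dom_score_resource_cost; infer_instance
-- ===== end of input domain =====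

-- B projects handled attributes to (category,type) keys and sums 100/50/1-weighted tier counts
-- instead of A's per-attribute if/elif accumulation (objective: alternative).
-- ===== PORT A =====
-- Port of A: per-attribute if/elif cascade over category then type (dict[k] = first-match
-- lookup; Pre_ guarantees the looked-up keys are present, so getD "" is exact there).
def aStep (s : Int) (attr : List (String × String)) : Int :=
  let cat := (List.lookup "category" attr).getD ""
  if cat == "Network activity" then
    let ty := (List.lookup "type" attr).getD ""
    if ty == "domain" then s + 100
    else if ty == "hostname" || ty == "url" || ty == "ip-src" then s + 50
    else s
  else if cat == "Payload delivery" || cat == "Payload installation" || cat == "Artifacts dropped" then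
    let ty := (List.lookup "type" attr).getD ""
    if ty == "vulnerability" then s + 100
    else if ty == "malware-sample" then s + 50
    else if ty == "filename" || ty == "filename|md5" || ty == "filename|sha1" || ty == "filename|sha256" || ty == "attachment" then s + 1
    else if ty == "md5" || ty == "sha1" || ty == "sha256" then s + 1
    else s
  else if cat == "External analysis" then
    let ty := (List.lookup "type" attr).getD ""
    if ty == "vulnerability" then s + 100
    else if ty == "filename" || ty == "filename|md5" || ty == "filename|sha1" || ty == "filename|sha256" then s + 1
    else if ty == "md5" || ty == "sha1" || ty == "sha256" then s + 1
    else s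
  else s

def score_resource_cost (event : List (String × String)) (attributes : List (List (String × String))) : Int :=
  attributes.foldl aStep 0

-- ===== PORT B =====
-- Port of B: project to (category,type) keys for handled categories, then
-- score = 100 * |keys ∩ tier100| + 50 * |keys ∩ tier50| + |keys ∩ tier1|.
def handledCats : List String :=
  ["Network activity", "Payload delivery", "Payload installation",
   "Artifacts dropped", "External analysis"]

def tier100 : List (String × String) :=
  [("Network activity", "domain"),
   ("Payload delivery", "vulnerability"), ("Payload installation", "vulnerability"),
   ("Artifacts dropped", "vulnerability"), ("External analysis", "vulnerability")]

def tier50 : List (String × String) :=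
  [("Network activity", "hostname"), ("Network activity", "url"), ("Network activity", "ip-src"),
   ("Payload delivery", "malware-sample"), ("Payload installation", "malware-sample"),
   ("Artifacts dropped", "malware-sample")]

def tier1 : List (String × String) :=
  [("Payload delivery", "filename"), ("Payload delivery", "filename|md5"),
   ("Payload delivery", "filename|sha1"), ("Payload delivery", "filename|sha256"),
   ("Payload delivery", "attachment"), ("Payload delivery", "md5"),
   ("Payload delivery", "sha1"), ("Payload delivery", "sha256"),
   ("Payload installation", "filename"), ("Payload installation", "filename|md5"),
   ("Payload installation", "filename|sha1"), ("Payload installation", "filename|sha256"),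
   ("Payload installation", "attachment"), ("Payload installation", "md5"),
   ("Payload installation", "sha1"), ("Payload installation", "sha256"),
   ("Artifacts dropped", "filename"), ("Artifacts dropped", "filename|md5"),
   ("Artifacts dropped", "filename|sha1"), ("Artifacts dropped", "filename|sha256"),
   ("Artifacts dropped", "attachment"), ("Artifacts dropped", "md5"),
   ("Artifacts dropped", "sha1"), ("Artifacts dropped", "sha256"),
   ("External analysis", "filename"), ("External analysis", "filename|md5"),
   ("External analysis", "filename|sha1"), ("External analysis", "filename|sha256"),
   ("External analysis", "md5"), ("External analysis", "sha1"), ("External analysis", "sha256")]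

def score_resource_cost_alt (event : List (String × String)) (attributes : List (List (String × String))) : Int :=
  let keys :=
    (attributes.filter (fun a => handledCats.contains ((List.lookup "category" a).getD ""))).map
      (fun a => ((List.lookup "category" a).getD "", (List.lookup "type" a).getD ""))
  100 * (keys.countP (fun k => tier100.contains k) : Int)
    + 50 * (keys.countP (fun k => tier50.contains k) : Int)
    + (keys.countP (fun k => tier1.contains k) : Int)

-- ===== PRECONDITION & SPEC =====
-- Pre_ excludes exactly the inputs on which Python A raises KeyError: an attribute without a
-- "category" key, or one whose category the cascade handles but which lacks a "type" key.
def Pre_score_resource_cost (event : List (String × String)) (attributes : List (List (String × String))) : Prop :=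
  ∀ attr ∈ attributes,
    (List.lookup "category" attr).isSome = true ∧
    ((List.lookup "category" attr).getD "" ∈
        ["Network activity", "Payload delivery", "Payload installation", "Artifacts dropped", "External analysis"] →
      (List.lookup "type" attr).isSome = true)
instance (event : List (String × String)) (attributes : List (List (String × String))) : Decidable (Pre_score_resource_cost event attributes) := by unfold Pre_score_resource_cost; infer_instance

def pvWitness_score_resource_cost : (List (String × String)) × (List (List (String × String))) :=
  ([], [[("category", "Network activity"), ("type", "domain")], [("category", "Other"), ("comment", "x")]])

def Spec_score_resource_cost (event : List (String × String)) (attributes : List (List (String × String))) (out : Int) : Prop := out = score_resource_cost_alt event attributes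
instance (event : List (String × String)) (attributes : List (List (String × String))) (out : Int) : Decidable (Spec_score_resource_cost event attributes out) := by unfold Spec_score_resource_cost; infer_instance

-- ===== CLAIM (what is proved, stated in full; the proofs are below) =====
def Claim_equal_score_resource_cost : Prop := ∀ (event : List (String × String)) (attributes : List (List (String × String))), Dom_score_resource_cost event attributes → Pre_score_resource_cost event attributes → Spec_score_resource_cost event attributes (score_resource_cost event attributes)

-- ===== LEMMAS AND PROOFS =====

-- The per-attribute contribution as B computes it: weighted tier-membership indicators.
def contrib (attr : List (String × String)) : Int :=
  let cat := (List.lookup "category" attr).getD ""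
  if handledCats.contains cat then
    let ty := (List.lookup "type" attr).getD ""
    100 * (if tier100.contains (cat, ty) then 1 else 0)
      + 50 * (if tier50.contains (cat, ty) then 1 else 0)
      + (if tier1.contains (cat, ty) then 1 else 0)
  else 0

-- A's shared payload-category cascade equals the weighted tier indicators, for any of the
-- three payload categories (hypotheses pin down how that category sits in the tier tables).
theorem payload_case (s : Int) (ty : String) (cat : String)
    (hH : handledCats.contains cat = true)
    (h100 : ∀ t, tier100.contains (cat, t) = (t == "vulnerability"))
    (h50 : ∀ t, tier50.contains (cat, t) = (t == "malware-sample"))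
    (h1 : ∀ t, tier1.contains (cat, t) = (t == "filename" || t == "filename|md5" || t == "filename|sha1" || t == "filename|sha256" || t == "attachment" || t == "md5" || t == "sha1" || t == "sha256")) :
    (if ty == "vulnerability" then s + 100
     else if ty == "malware-sample" then s + 50
     else if ty == "filename" || ty == "filename|md5" || ty == "filename|sha1" || ty == "filename|sha256" || ty == "attachment" then s + 1
     else if ty == "md5" || ty == "sha1" || ty == "sha256" then s + 1
     else s)
    = s + (if handledCats.contains cat = true then
             100 * (if tier100.contains (cat, ty) = true then 1 else 0)
               + 50 * (if tier50.contains (cat, ty) = true then 1 else 0)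
               + (if tier1.contains (cat, ty) = true then 1 else 0)
           else 0) := by
  simp only [hH, h100 ty, h50 ty, h1 ty, if_true]
  by_cases t1 : ty = "vulnerability"
  · simp [t1]
  by_cases t2 : ty = "malware-sample"
  · simp [t1, t2]
  by_cases t3 : ty = "filename"
  · simp [t1, t2, t3]
  by_cases t4 : ty = "filename|md5"
  · simp [t1, t2, t3, t4]
  by_cases t5 : ty = "filename|sha1"
  · simp [t1, t2, t3, t4, t5]
  by_cases t6 : ty = "filename|sha256"
  · simp [t1, t2, t3, t4, t5, t6]
  by_cases t7 : ty = "attachment"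
  · simp [t1, t2, t3, t4, t5, t6, t7]
  by_cases t8 : ty = "md5"
  · simp [t1, t2, t3, t4, t5, t6, t7, t8]
  by_cases t9 : ty = "sha1"
  · simp [t1, t2, t3, t4, t5, t6, t7, t8, t9]
  by_cases t10 : ty = "sha256"
  · simp [t1, t2, t3, t4, t5, t6, t7, t8, t9, t10]
  simp [t1, t2, t3, t4, t5, t6, t7, t8, t9, t10]

theorem step_eq_contrib (s : Int) (attr : List (String × String)) :
    aStep s attr = s + contrib attr := by
  simp only [aStep, contrib]
  generalize (List.lookup "category" attr).getD "" = cat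
  generalize (List.lookup "type" attr).getD "" = ty
  by_cases h1 : cat = "Network activity"
  · subst h1
    by_cases t1 : ty = "domain"
    · simp [t1, handledCats, tier100, tier50, tier1]
    by_cases t2 : ty = "hostname"
    · simp [t1, t2, handledCats, tier100, tier50, tier1]
    by_cases t3 : ty = "url"
    · simp [t1, t2, t3, handledCats, tier100, tier50, tier1]
    by_cases t4 : ty = "ip-src"
    · simp [t1, t2, t3, t4, handledCats, tier100, tier50, tier1]
    simp [handledCats, tier100, tier50, tier1, t1, t2, t3, t4]
  by_cases h2 : cat = "Payload delivery"
  · subst h2; exact payload_case s ty "Payload delivery" (by decide)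
      (fun t => by rw [Bool.eq_iff_iff]; simp [tier100, List.contains_eq_mem, Prod.ext_iff]; try tauto)
      (fun t => by rw [Bool.eq_iff_iff]; simp [tier50, List.contains_eq_mem, Prod.ext_iff]; try tauto)
      (fun t => by rw [Bool.eq_iff_iff]; simp [tier1, List.contains_eq_mem, Prod.ext_iff]; try tauto)
  by_cases h3 : cat = "Payload installation"
  · subst h3; exact payload_case s ty "Payload installation" (by decide)
      (fun t => by rw [Bool.eq_iff_iff]; simp [tier100, List.contains_eq_mem, Prod.ext_iff]; try tauto)
      (fun t => by rw [Bool.eq_iff_iff]; simp [tier50, List.contains_eq_mem, Prod.ext_iff]; try tauto)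
      (fun t => by rw [Bool.eq_iff_iff]; simp [tier1, List.contains_eq_mem, Prod.ext_iff]; try tauto)
  by_cases h4 : cat = "Artifacts dropped"
  · subst h4; exact payload_case s ty "Artifacts dropped" (by decide)
      (fun t => by rw [Bool.eq_iff_iff]; simp [tier100, List.contains_eq_mem, Prod.ext_iff]; try tauto)
      (fun t => by rw [Bool.eq_iff_iff]; simp [tier50, List.contains_eq_mem, Prod.ext_iff]; try tauto)
      (fun t => by rw [Bool.eq_iff_iff]; simp [tier1, List.contains_eq_mem, Prod.ext_iff]; try tauto)
  by_cases h5 : cat = "External analysis"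
  · subst h5
    by_cases t1 : ty = "vulnerability"
    · simp [t1, handledCats, tier100, tier50, tier1]
    by_cases t3 : ty = "filename"
    · simp [t3, handledCats, tier100, tier50, tier1, t1]
    by_cases t4 : ty = "filename|md5"
    · simp [t4, handledCats, tier100, tier50, tier1, t1, t3]
    by_cases t5 : ty = "filename|sha1"
    · simp [t5, handledCats, tier100, tier50, tier1, t1, t3, t4]
    by_cases t6 : ty = "filename|sha256"
    · simp [t6, handledCats, tier100, tier50, tier1, t1, t3, t4, t5]
    by_cases t8 : ty = "md5"
    · simp [t8, handledCats, tier100, tier50, tier1, t1, t3, t4, t5, t6]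
    by_cases t9 : ty = "sha1"
    · simp [t9, handledCats, tier100, tier50, tier1, t1, t3, t4, t5, t6, t8]
    by_cases t10 : ty = "sha256"
    · simp [t10, handledCats, tier100, tier50, tier1, t1, t3, t4, t5, t6, t8, t9]
    simp [handledCats, tier100, tier50, tier1, t1, t3, t4, t5, t6, t8, t9, t10]
  simp [handledCats, h1, h2, h3, h4, h5]

theorem alt_cons (event : List (String × String)) (a : List (String × String))
    (l : List (List (String × String))) :
    score_resource_cost_alt event (a :: l) = contrib a + score_resource_cost_alt event l := by
  simp only [score_resource_cost_alt, contrib]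
  by_cases h : handledCats.contains ((List.lookup "category" a).getD "") = true
  · simp only [h, List.filter_cons_of_pos, List.map_cons, List.countP_cons, if_true]
    split_ifs <;> push_cast <;> ring
  · rw [List.filter_cons_of_neg (by simpa using h)]
    have h' : ((List.lookup "category" a).getD "") ∉ handledCats := by simpa using h
    simp [h']

theorem foldl_eq_alt (event : List (String × String)) (attributes : List (List (String × String)))
    (s : Int) :
    attributes.foldl aStep s = s + score_resource_cost_alt event attributes := by
  induction attributes generalizing s with
  | nil => simp [score_resource_cost_alt]
  | cons a l ih =>
      rw [List.foldl_cons, step_eq_contrib, ih, alt_cons]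
      ring

-- ===== VERDICT (by name: the statement is the Claim_ definition above) =====
theorem score_resource_cost_spec : Claim_equal_score_resource_cost := by
  intro event attributes _ _
  unfold Spec_score_resource_cost score_resource_cost
  simpa using foldl_eq_alt event attributes 0
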